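-- pv_equiv track=rewrite | github.com/mcguile/thesis | src/utils.py | get_cell_neighbours
-- ===== SOURCE A (Python) =====
-- def get_minmax_rowcol(r, c, num_rows, num_cols):
--     min_r = max(r - 1, 0)
--     max_r = min(r + 1, num_rows - 1)
--     min_c = max(c - 1, 0)
--     max_c = min(c + 1, num_cols - 1)
--     return min_r, max_r, min_c, max_c
--
-- def get_cell_neighbours(r, c, num_rows, num_cols):
--     neighbours = []
--     min_r, max_r, min_c, max_c = get_minmax_rowcol(r, c, num_rows, num_cols)
--     for row in range(min_r, max_r + 1):
--         for col in range(min_c, max_c + 1):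
--             if col == c and row == r:
--                 continue
--             elif (c % 2 == 0) and ((col == c + 1 and row == r + 1) or (row == r + 1 and col == c - 1)):
--                 continue
--             elif (c % 2 == 1) and ((col == c - 1 and row == r - 1) or (row == r - 1 and col == c + 1)):
--                 continue
--             else:
--                 neighbours.append((row, col))
--     return neighbours
-- ===== SOURCE B (Python) =====
-- # Direct enumeration of the six hex neighbours by parity-dependent offsets,
-- # with a plain bounds check, instead of scanning the clipped 3x3 box and skipping.
-- _EVEN_OFFSETS = [(-1, -1), (-1, 0), (-1, 1), (0, -1), (0, 1), (1, 0)]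
-- _ODD_OFFSETS = [(-1, 0), (0, -1), (0, 1), (1, -1), (1, 0), (1, 1)]
--
-- def get_cell_neighbours(r, c, num_rows, num_cols):
--     offsets = _EVEN_OFFSETS if c % 2 == 0 else _ODD_OFFSETS
--     return [(r + dr, c + dc) for dr, dc in offsets
--             if 0 <= r + dr < num_rows and 0 <= c + dc < num_cols]
-- ===== Notes on version B (the rewrite author's own statement) =====
-- stated objective: simpler
-- what changed: Replaces the clipped 3x3 box scan with parity-based skip conditions by a direct enumeration of the six parity-dependent neighbour offsets filtered by a plain bounds check.
import Mathlib
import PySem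

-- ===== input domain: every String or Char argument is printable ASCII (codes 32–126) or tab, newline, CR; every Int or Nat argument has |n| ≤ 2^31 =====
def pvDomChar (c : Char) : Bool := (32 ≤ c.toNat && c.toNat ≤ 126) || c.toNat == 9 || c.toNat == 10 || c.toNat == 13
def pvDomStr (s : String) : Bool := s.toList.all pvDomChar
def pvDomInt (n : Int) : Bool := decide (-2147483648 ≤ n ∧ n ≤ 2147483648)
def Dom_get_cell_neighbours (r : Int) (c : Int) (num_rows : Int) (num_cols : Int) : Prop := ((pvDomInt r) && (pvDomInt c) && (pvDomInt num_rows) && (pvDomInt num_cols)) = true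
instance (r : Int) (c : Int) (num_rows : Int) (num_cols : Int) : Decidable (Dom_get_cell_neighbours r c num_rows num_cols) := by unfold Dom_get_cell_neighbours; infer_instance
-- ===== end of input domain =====

-- B replaces A's clipped-3x3-box scan with skip conditions by a direct enumeration of the
-- six parity-dependent neighbour offsets filtered by a plain bounds check (objective: simpler).

-- ===== PORT A =====
def get_minmax_rowcol (r : Int) (c : Int) (num_rows : Int) (num_cols : Int) : Int × Int × Int × Int :=
  (max (r - 1) 0, min (r + 1) (num_rows - 1), max (c - 1) 0, min (c + 1) (num_cols - 1))

def get_cell_neighbours (r : Int) (c : Int) (num_rows : Int) (num_cols : Int) : List (Int × Int) :=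
  match get_minmax_rowcol r c num_rows num_cols with
  | (min_r, max_r, min_c, max_c) =>
    (PySem.List.pyRange min_r (max_r + 1)).foldl (fun neighbours row =>
      (PySem.List.pyRange min_c (max_c + 1)).foldl (fun neighbours col =>
        if col = c ∧ row = r then neighbours
        else if PySem.Int.mod c 2 = 0 ∧ ((col = c + 1 ∧ row = r + 1) ∨ (row = r + 1 ∧ col = c - 1)) then neighbours
        else if PySem.Int.mod c 2 = 1 ∧ ((col = c - 1 ∧ row = r - 1) ∨ (row = r - 1 ∧ col = c + 1)) then neighbours
        else neighbours ++ [(row, col)]) neighbours) []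

-- ===== PORT B =====
def pvEvenOffsets : List (Int × Int) := [(-1, -1), (-1, 0), (-1, 1), (0, -1), (0, 1), (1, 0)]
def pvOddOffsets : List (Int × Int) := [(-1, 0), (0, -1), (0, 1), (1, -1), (1, 0), (1, 1)]

def get_cell_neighbours_alt (r : Int) (c : Int) (num_rows : Int) (num_cols : Int) : List (Int × Int) :=
  let offsets := if PySem.Int.mod c 2 = 0 then pvEvenOffsets else pvOddOffsets
  (offsets.filter (fun p =>
      decide (0 ≤ r + p.1 ∧ r + p.1 < num_rows) && decide (0 ≤ c + p.2 ∧ c + p.2 < num_cols))).map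
    (fun p => (r + p.1, c + p.2))

-- ===== PRECONDITION & SPEC =====
def Spec_get_cell_neighbours (r : Int) (c : Int) (num_rows : Int) (num_cols : Int) (out : List (Int × Int)) : Prop := out = get_cell_neighbours_alt r c num_rows num_cols
instance (r : Int) (c : Int) (num_rows : Int) (num_cols : Int) (out : List (Int × Int)) : Decidable (Spec_get_cell_neighbours r c num_rows num_cols out) := by unfold Spec_get_cell_neighbours; infer_instance

-- ===== CLAIM (what is proved, stated in full; the proofs are below) =====
def Claim_equal_get_cell_neighbours : Prop := ∀ (r : Int) (c : Int) (num_rows : Int) (num_cols : Int), Dom_get_cell_neighbours r c num_rows num_cols → Spec_get_cell_neighbours r c num_rows num_cols (get_cell_neighbours r c num_rows num_cols)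

-- ===== LEMMAS AND PROOFS =====

-- the neighbour-keeping test of A's inner loop, as a Bool predicate
def pvKeep (r : Int) (c : Int) (row : Int) (col : Int) : Bool :=
  !decide (col = c ∧ row = r) &&
  !decide (PySem.Int.mod c 2 = 0 ∧ ((col = c + 1 ∧ row = r + 1) ∨ (row = r + 1 ∧ col = c - 1))) &&
  !decide (PySem.Int.mod c 2 = 1 ∧ ((col = c - 1 ∧ row = r - 1) ∨ (row = r - 1 ∧ col = c + 1)))

lemma inner_eq (r c row : Int) (cols : List Int) (acc : List (Int × Int)) :
    cols.foldl (fun neighbours col =>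
        if col = c ∧ row = r then neighbours
        else if PySem.Int.mod c 2 = 0 ∧ ((col = c + 1 ∧ row = r + 1) ∨ (row = r + 1 ∧ col = c - 1)) then neighbours
        else if PySem.Int.mod c 2 = 1 ∧ ((col = c - 1 ∧ row = r - 1) ∨ (row = r - 1 ∧ col = c + 1)) then neighbours
        else neighbours ++ [(row, col)]) acc
      = acc ++ (cols.filter (pvKeep r c row)).map (fun col => (row, col)) := by
  induction cols generalizing acc with
  | nil => simp
  | cons x xs ih =>
    rw [List.foldl_cons, ih]
    by_cases h1 : x = c ∧ row = r
    · rw [if_pos h1, List.filter_cons_of_neg (by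
        simp only [pvKeep, Bool.and_eq_true, Bool.not_eq_true', decide_eq_false_iff_not, not_and]
        tauto)]
    · by_cases h2 : PySem.Int.mod c 2 = 0 ∧ ((x = c + 1 ∧ row = r + 1) ∨ (row = r + 1 ∧ x = c - 1))
      · rw [if_neg h1, if_pos h2, List.filter_cons_of_neg (by
          simp only [pvKeep, Bool.and_eq_true, Bool.not_eq_true', decide_eq_false_iff_not, not_and]
          tauto)]
      · by_cases h3 : PySem.Int.mod c 2 = 1 ∧ ((x = c - 1 ∧ row = r - 1) ∨ (row = r - 1 ∧ x = c + 1))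
        · rw [if_neg h1, if_neg h2, if_pos h3, List.filter_cons_of_neg (by
            simp only [pvKeep, Bool.and_eq_true, Bool.not_eq_true', decide_eq_false_iff_not, not_and]
            tauto)]
        · rw [if_neg h1, if_neg h2, if_neg h3, List.filter_cons_of_pos (by
            simp only [pvKeep, Bool.and_eq_true, Bool.not_eq_true', decide_eq_false_iff_not]
            tauto)]
          simp

lemma pyRange_clip (x hi : Int) :
    PySem.List.pyRange (max (x - 1) 0) (min (x + 1) (hi - 1) + 1)
      = [x - 1, x, x + 1].filter (fun t => decide (0 ≤ t ∧ t < hi)) := by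
  have hpR : List.Pairwise (fun a b : Int => a < b)
      ([x - 1, x, x + 1].filter (fun t => decide (0 ≤ t ∧ t < hi))) := by
    refine List.Pairwise.sublist (List.filter_sublist) ?_
    refine .cons ?_ (.cons ?_ (.cons ?_ .nil)) <;> intro b hb <;> simp at hb <;> omega
  have hpL := PySem.List.pairwise_lt_pyRange_one (max (x - 1) 0) (min (x + 1) (hi - 1) + 1)
  have hperm : (PySem.List.pyRange (max (x - 1) 0) (min (x + 1) (hi - 1) + 1)).Perm
      ([x - 1, x, x + 1].filter (fun t => decide (0 ≤ t ∧ t < hi))) := by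
    rw [List.perm_ext_iff_of_nodup (hpL.imp ne_of_lt) (hpR.imp ne_of_lt)]
    intro t
    simp [PySem.List.mem_pyRange_one, List.mem_filter]
    omega
  exact List.Perm.eq_of_pairwise (fun a b _ _ hab hba => absurd hab (asymm hba)) hpL hpR hperm

-- exchange a filtered flatMap for a flatMap followed by one filter
lemma pvFilterFlatMap (rows : List Int) (f : Int → List (Int × Int)) (P : Int → Bool)
    (Q : Int × Int → Bool) (hf : ∀ row p, p ∈ f row → p.1 = row) :
    (rows.filter P).flatMap (fun row => (f row).filter Q)
      = (rows.flatMap f).filter (fun p => P p.1 && Q p) := by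
  induction rows with
  | nil => simp
  | cons x xs ih =>
    rw [List.filter_cons, List.flatMap_cons, List.filter_append, ← ih]
    by_cases hx : P x = true
    · rw [if_pos hx, List.flatMap_cons]
      congr 1
      refine (List.filter_congr ?_).symm
      intro p hp
      rw [hf x p hp, hx, Bool.true_and]
    · rw [if_neg hx]
      have : (f x).filter (fun p => P p.1 && Q p) = [] := by
        rw [List.filter_eq_nil_iff]
        intro p hp
        rw [hf x p hp]
        simp [Bool.eq_false_iff.mpr hx]
      rw [this, List.nil_append]

-- push the map making (row, col) pairs through the column-bounds filter
lemma pvFilterMapSnd (S : List Int) (row : Int) (q : Int → Bool) :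
    (S.filter q).map (fun col => (row, col))
      = (S.map (fun col => (row, col))).filter (fun p => q p.2) := by
  rw [List.filter_map]; rfl

lemma main_parity (r c num_rows num_cols : Int) :
    get_cell_neighbours r c num_rows num_cols = get_cell_neighbours_alt r c num_rows num_cols := by
  simp only [get_cell_neighbours, get_minmax_rowcol, get_cell_neighbours_alt]
  simp only [inner_eq, PySem.List.foldl_append_eq_flatMap, List.nil_append]
  rw [pyRange_clip r num_rows, pyRange_clip c num_cols]
  have hswap : ∀ x : Int,
      ([c - 1, c, c + 1].filter (fun t => decide (0 ≤ t ∧ t < num_cols))).filter (pvKeep r c x)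
        = ([c - 1, c, c + 1].filter (pvKeep r c x)).filter (fun t => decide (0 ≤ t ∧ t < num_cols)) :=
    fun x => List.filter_comm _ _ _
  simp only [hswap]
  have hpush : ∀ x : Int,
      (([c - 1, c, c + 1].filter (pvKeep r c x)).filter (fun t => decide (0 ≤ t ∧ t < num_cols))).map
          (fun col => (x, col))
        = (([c - 1, c, c + 1].filter (pvKeep r c x)).map (fun col => (x, col))).filter
            (fun p => decide (0 ≤ p.2 ∧ p.2 < num_cols)) :=
    fun x => pvFilterMapSnd _ x _
  simp only [hpush]
  rw [pvFilterFlatMap [r - 1, r, r + 1]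
        (fun row => ([c - 1, c, c + 1].filter (pvKeep r c row)).map (fun col => (row, col)))
        (fun t => decide (0 ≤ t ∧ t < num_rows)) (fun p => decide (0 ≤ p.2 ∧ p.2 < num_cols))
        (by intro row p hp; rcases List.mem_map.mp hp with ⟨col, _, rfl⟩; rfl)]
  rcases PySem.Int.mod_two_eq c with hc | hc
  · have hm2 : c % 2 = 0 := by rw [← PySem.Int.mod_eq_emod_of_pos (by norm_num)]; exact hc
    have S1 : [c - 1, c, c + 1].filter (pvKeep r c (r - 1)) = [c - 1, c, c + 1] := by
      simp [pvKeep, hm2, show ¬ (r - 1 = r) from by omega, show ¬ (r - 1 = r + 1) from by omega]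
    have S2 : [c - 1, c, c + 1].filter (pvKeep r c r) = [c - 1, c + 1] := by
      simp [pvKeep, show ¬ (c - 1 = c) from by omega, show ¬ (c + 1 = c) from by omega,
        show ¬ (r = r + 1) from by omega, show ¬ (r = r - 1) from by omega]
    have S3 : [c - 1, c, c + 1].filter (pvKeep r c (r + 1)) = [c] := by
      simp [pvKeep, hm2, show ¬ (r + 1 = r) from by omega, show ¬ (r + 1 = r - 1) from by omega,
        show ¬ (c = c + 1) from by omega, show ¬ (c = c - 1) from by omega]
    rw [if_pos hc]
    simp only [List.flatMap_cons, List.flatMap_nil, S1, S2, S3, List.append_nil,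
      List.map_cons, List.map_nil, pvEvenOffsets]
    have hB : List.map (fun p : Int × Int => (r + p.1, c + p.2))
        (List.filter (fun p : Int × Int => decide (0 ≤ r + p.1 ∧ r + p.1 < num_rows) && decide (0 ≤ c + p.2 ∧ c + p.2 < num_cols))
          [(-1, -1), (-1, 0), (-1, 1), (0, -1), (0, 1), (1, 0)])
        = List.filter (fun p : Int × Int => decide (0 ≤ p.1 ∧ p.1 < num_rows) && decide (0 ≤ p.2 ∧ p.2 < num_cols))
          (List.map (fun p : Int × Int => (r + p.1, c + p.2)) [(-1, -1), (-1, 0), (-1, 1), (0, -1), (0, 1), (1, 0)]) := by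
      rw [List.filter_map]; rfl
    rw [hB]
    simp only [List.map_cons, List.map_nil, List.cons_append, List.nil_append,
      show (r + (-1 : Int)) = r - 1 from by ring, show (c + (-1 : Int)) = c - 1 from by ring,
      add_zero]
  · have hc0 : ¬ PySem.Int.mod c 2 = 0 := by rw [hc]; decide
    have hm2 : c % 2 = 1 := by rw [← PySem.Int.mod_eq_emod_of_pos (by norm_num)]; exact hc
    have S1 : [c - 1, c, c + 1].filter (pvKeep r c (r - 1)) = [c] := by
      simp [pvKeep, hm2, show ¬ (r - 1 = r) from by omega, show ¬ (r - 1 = r + 1) from by omega,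
        show ¬ (c = c - 1) from by omega, show ¬ (c = c + 1) from by omega]
    have S2 : [c - 1, c, c + 1].filter (pvKeep r c r) = [c - 1, c + 1] := by
      simp [pvKeep, show ¬ (c - 1 = c) from by omega, show ¬ (c + 1 = c) from by omega,
        show ¬ (r = r + 1) from by omega, show ¬ (r = r - 1) from by omega]
    have S3 : [c - 1, c, c + 1].filter (pvKeep r c (r + 1)) = [c - 1, c, c + 1] := by
      simp [pvKeep, hm2, show ¬ (r + 1 = r) from by omega, show ¬ (r + 1 = r - 1) from by omega]
    rw [if_neg hc0]
    simp only [List.flatMap_cons, List.flatMap_nil, S1, S2, S3, List.append_nil,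
      List.map_cons, List.map_nil, pvOddOffsets]
    have hB : List.map (fun p : Int × Int => (r + p.1, c + p.2))
        (List.filter (fun p : Int × Int => decide (0 ≤ r + p.1 ∧ r + p.1 < num_rows) && decide (0 ≤ c + p.2 ∧ c + p.2 < num_cols))
          [(-1, 0), (0, -1), (0, 1), (1, -1), (1, 0), (1, 1)])
        = List.filter (fun p : Int × Int => decide (0 ≤ p.1 ∧ p.1 < num_rows) && decide (0 ≤ p.2 ∧ p.2 < num_cols))
          (List.map (fun p : Int × Int => (r + p.1, c + p.2)) [(-1, 0), (0, -1), (0, 1), (1, -1), (1, 0), (1, 1)]) := by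
      rw [List.filter_map]; rfl
    rw [hB]
    simp only [List.map_cons, List.map_nil, List.cons_append, List.nil_append,
      show (r + (-1 : Int)) = r - 1 from by ring, show (c + (-1 : Int)) = c - 1 from by ring,
      add_zero]

-- ===== VERDICT (by name: the statement is the Claim_ definition above) =====
theorem get_cell_neighbours_spec : Claim_equal_get_cell_neighbours := by
  intro r c num_rows num_cols _
  unfold Spec_get_cell_neighbours
  exact main_parity r c num_rows num_cols
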